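-- pv_equiv track=rewrite | github.com/tamasakian/minigen | src/minigen/core/blast.py | identify_qseqid_with_tag_none
-- ===== SOURCE A (Python) =====
-- from collections import defaultdict
--
-- def get_tag(seqid: str) -> str | None:
--     if "|" not in seqid:
--         return None
--     return seqid.split("|")[-1]
--
-- def identify_qseqid_with_tag_none(records: list[dict], tag_list: list[str]) -> list[str]:
--     allowed = set(tag_list)
--     qry2tags = defaultdict(list)
--     for record in records:
--         qseqid = record["qseqid"]
--         rseqid = record["rseqid"]
--         tag = get_tag(rseqid)
--         qry2tags[qseqid].append(tag)
--     matched = []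
--     for qseqid, tags in qry2tags.items():
--         if any(tag in allowed for tag in tags):
--             continue
--         matched.append(qseqid)
--     return matched
-- ===== SOURCE B (Python) =====
-- def identify_qseqid_with_tag_none(records: list[dict], tag_list: list[str]) -> list[str]:
--     allowed = set(tag_list)
--     # single pass: per qseqid (first-seen order) keep one running boolean "has any allowed tag"
--     ok = {}
--     for record in records:
--         q = record["qseqid"]
--         r = record["rseqid"]
--         hit = "|" in r and r.split("|")[-1] in allowed
--         ok[q] = ok.get(q, False) or hit
--     return [q for q, good in ok.items() if not good]
-- ===== Notes on version B (the rewrite author's own statement) =====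
-- stated objective: simpler
-- what changed: Single pass keeping one running boolean 'has an allowed tag' per qseqid in an insertion-ordered dict instead of materializing per-qseqid tag lists and scanning them in a second any()-loop; the result is the non-hit keys in first-seen order.
import Mathlib
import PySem

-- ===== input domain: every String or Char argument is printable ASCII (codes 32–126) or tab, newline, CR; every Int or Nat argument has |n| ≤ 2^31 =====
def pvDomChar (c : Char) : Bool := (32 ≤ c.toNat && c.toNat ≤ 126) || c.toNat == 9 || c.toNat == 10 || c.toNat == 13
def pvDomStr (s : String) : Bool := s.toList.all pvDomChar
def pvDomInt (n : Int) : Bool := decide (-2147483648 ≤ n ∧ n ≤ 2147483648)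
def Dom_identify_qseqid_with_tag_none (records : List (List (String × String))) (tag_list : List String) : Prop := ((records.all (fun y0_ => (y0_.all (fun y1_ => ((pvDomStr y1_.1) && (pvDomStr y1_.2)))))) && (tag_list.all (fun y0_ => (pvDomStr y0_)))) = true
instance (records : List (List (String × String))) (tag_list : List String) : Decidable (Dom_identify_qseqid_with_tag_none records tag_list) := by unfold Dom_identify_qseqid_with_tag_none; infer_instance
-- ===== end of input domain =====

-- B replaces A's "collect all tags per qseqid, then scan each list" by a single pass keeping
-- one running boolean per qseqid (simpler, no per-qseqid tag lists); return value is identical on Pre_.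

-- ===== PORT A =====
-- get_tag: split("|")[-1] ported as pyGetD with default "" — exact, since str.split never returns an empty list
def getTag (seqid : String) : Option String :=
  if PySem.Str.isIn "|" seqid = false then none
  else some (PySem.List.pyGetD ((PySem.Str.split? seqid "|").getD []) (-1) "")

-- 'tag in allowed' where tag may be None: None is never in a set of strings
def tagInAllowed (allowed : PySem.Set String) (tag : Option String) : Bool :=
  match tag with
  | none => false
  | some t => PySem.Set.contains allowed t

def stepA (d : PySem.Dict String (List (Option String))) (record : List (String × String)) :
    PySem.Dict String (List (Option String)) :=
  let qseqid := (PySem.Dict.mk record).getD "qseqid" ""   -- record["qseqid"]; KeyError excluded by Pre_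
  let rseqid := (PySem.Dict.mk record).getD "rseqid" ""
  let tag := getTag rseqid
  d.modify qseqid [] (fun tags => tags ++ [tag])          -- qry2tags[qseqid].append(tag)

def identify_qseqid_with_tag_none (records : List (List (String × String))) (tag_list : List String) : List String :=
  let allowed := PySem.Set.ofList tag_list
  let qry2tags := records.foldl stepA PySem.Dict.empty
  qry2tags.items.foldl
    (fun matched p => if p.2.any (tagInAllowed allowed) then matched else matched ++ [p.1]) []

-- ===== PORT B =====
def stepB (allowed : PySem.Set String) (d : PySem.Dict String Bool) (record : List (String × String)) :
    PySem.Dict String Bool :=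
  let q := (PySem.Dict.mk record).getD "qseqid" ""
  let r := (PySem.Dict.mk record).getD "rseqid" ""
  let hit := PySem.Str.isIn "|" r &&
             PySem.Set.contains allowed (PySem.List.pyGetD ((PySem.Str.split? r "|").getD []) (-1) "")
  d.insert q (d.getD q false || hit)

def identify_qseqid_with_tag_none_alt (records : List (List (String × String))) (tag_list : List String) : List String :=
  let allowed := PySem.Set.ofList tag_list
  let ok := records.foldl (stepB allowed) PySem.Dict.empty
  (ok.items.filter (fun p => !p.2)).map (fun p => p.1)

-- ===== PRECONDITION & SPEC =====
-- Pre_ excludes exactly the records missing key "qseqid" or "rseqid", on which A raises KeyError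
def Pre_identify_qseqid_with_tag_none (records : List (List (String × String))) (tag_list : List String) : Prop :=
  records.all (fun record => (PySem.Dict.mk record).contains "qseqid" && (PySem.Dict.mk record).contains "rseqid") = true
instance (records : List (List (String × String))) (tag_list : List String) : Decidable (Pre_identify_qseqid_with_tag_none records tag_list) := by unfold Pre_identify_qseqid_with_tag_none; infer_instance

def pvWitness_identify_qseqid_with_tag_none : (List (List (String × String))) × List String :=
  ([[("qseqid", "q1"), ("rseqid", "ref|T1")], [("qseqid", "q2"), ("rseqid", "plain")]], ["T1"])

def Spec_identify_qseqid_with_tag_none (records : List (List (String × String))) (tag_list : List String) (out : List String) : Prop := out = identify_qseqid_with_tag_none_alt records tag_list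
instance (records : List (List (String × String))) (tag_list : List String) (out : List String) : Decidable (Spec_identify_qseqid_with_tag_none records tag_list out) := by unfold Spec_identify_qseqid_with_tag_none; infer_instance

-- ===== CLAIM (what is proved, stated in full; the proofs are below) =====
def Claim_equal_identify_qseqid_with_tag_none : Prop := ∀ (records : List (List (String × String))) (tag_list : List String), Dom_identify_qseqid_with_tag_none records tag_list → Pre_identify_qseqid_with_tag_none records tag_list → Spec_identify_qseqid_with_tag_none records tag_list (identify_qseqid_with_tag_none records tag_list)

-- ===== LEMMAS AND PROOFS =====

-- the hit computed by stepB equals A's "tag in allowed" test on get_tag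
theorem hit_eq (allowed : PySem.Set String) (r : String) :
    tagInAllowed allowed (getTag r) =
      (PySem.Str.isIn "|" r &&
       PySem.Set.contains allowed (PySem.List.pyGetD ((PySem.Str.split? r "|").getD []) (-1) "")) := by
  unfold getTag tagInAllowed PySem.Str.isIn
  have e : "|".toList = ['|'] := rfl
  rw [e]
  cases h : PySem.Chars.isIn ['|'] r.toList <;> simp [h]

-- loop invariant: after processing the same records, the two dicts have the same (Nodup) key
-- order, and per key A's "any tag allowed" equals B's running boolean
theorem loop_inv (allowed : PySem.Set String) (recs : List (List (String × String))) :
    ∀ (dA : PySem.Dict String (List (Option String))) (dB : PySem.Dict String Bool),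
      dA.keys.Nodup → dA.keys = dB.keys →
      (∀ q, (dA.getD q []).any (tagInAllowed allowed) = dB.getD q false) →
      (recs.foldl stepA dA).keys.Nodup ∧
      (recs.foldl stepA dA).keys = (recs.foldl (stepB allowed) dB).keys ∧
      (∀ q, ((recs.foldl stepA dA).getD q []).any (tagInAllowed allowed) =
            (recs.foldl (stepB allowed) dB).getD q false) := by
  induction recs with
  | nil => intro dA dB h1 h2 h3; exact ⟨h1, h2, h3⟩
  | cons rec recs ih =>
    intro dA dB h1 h2 h3
    simp only [List.foldl_cons]
    apply ih
    · -- keys stay Nodup through modify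
      unfold stepA
      rw [PySem.Dict.keys_modify]
      rcases h : dA.contains ((PySem.Dict.mk rec).getD "qseqid" "") with _ | _
      · rw [PySem.Dict.keys_insert_of_not_contains _ _ h]
        refine List.Nodup.append h1 (List.nodup_singleton _) ?_
        intro a ha hb
        rw [List.mem_singleton] at hb
        subst hb
        rw [← PySem.Dict.contains_iff_mem_keys] at ha
        rw [ha] at h
        cases h
      · rw [PySem.Dict.keys_insert_of_contains _ _ h]; exact h1
    · -- same key order: modify and insert both keep existing keys, append a fresh one
      unfold stepA stepB
      have hc : dA.contains ((PySem.Dict.mk rec).getD "qseqid" "") =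
                dB.contains ((PySem.Dict.mk rec).getD "qseqid" "") := by
        rw [PySem.Dict.contains_eq_decide_mem_keys, PySem.Dict.contains_eq_decide_mem_keys, h2]
      rw [PySem.Dict.keys_modify]
      rcases h : dA.contains ((PySem.Dict.mk rec).getD "qseqid" "") with _ | _
      · rw [PySem.Dict.keys_insert_of_not_contains _ _ h,
            PySem.Dict.keys_insert_of_not_contains _ _ (by rw [← hc]; exact h), h2]
      · rw [PySem.Dict.keys_insert_of_contains _ _ h,
            PySem.Dict.keys_insert_of_contains _ _ (by rw [← hc]; exact h), h2]
    · -- per-key value relation after one step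
      intro q
      unfold stepA stepB
      rw [PySem.Dict.getD_modify, PySem.Dict.getD_insert]
      by_cases hq : q = (PySem.Dict.mk rec).getD "qseqid" ""
      · rw [if_pos hq, if_pos hq, List.any_append]
        simp [h3, hit_eq]
      · rw [if_neg hq, if_neg hq]
        exact h3 q

-- A's second loop (continue / append) is a filter of the items
theorem foldl_if_append {α β : Type} (f : α → Bool) (g : α → β) (l : List α) (acc : List β) :
    l.foldl (fun a x => if f x then a else a ++ [g x]) acc =
      acc ++ (l.filter (fun x => !f x)).map g := by
  induction l generalizing acc with
  | nil => simp
  | cons x l ih =>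
    by_cases h : f x <;> simp [List.foldl_cons, h, ih]

-- ===== VERDICT (by name: the statement is the Claim_ definition above) =====
theorem identify_qseqid_with_tag_none_spec : Claim_equal_identify_qseqid_with_tag_none := by
  intro records tag_list _ _
  unfold Spec_identify_qseqid_with_tag_none identify_qseqid_with_tag_none identify_qseqid_with_tag_none_alt
  obtain ⟨hnd, hk, hv⟩ :=
    loop_inv (PySem.Set.ofList tag_list) records PySem.Dict.empty PySem.Dict.empty
      PySem.Dict.nodup_keys_empty (by rfl) (by intro q; simp [PySem.Dict.getD_empty])
  dsimp only
  rw [foldl_if_append,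
      PySem.Dict.items_eq_map_keys _ hnd ([] : List (Option String)),
      PySem.Dict.items_eq_map_keys _ (hk ▸ hnd) false]
  simp only [List.filter_map, List.map_map, List.nil_append, Function.comp_def]
  rw [hk]
  congr 1
  apply List.filter_congr
  intro k _
  simp [hv k]
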